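-- pv_equiv track=rewrite | github.com/jacobleonard/cs20-S16-lab05 | lab05Funcs.py | indexOfShortestString
-- ===== SOURCE A (Python) =====
-- def indexOfShortestString(listOfStrings):
--     """
--     return index of shortest string from a non-empty list of strings, False otherwise
--
--     By "shortest", we mean a value that is no longer than any other value in the list
--
--     There may be more than one string that would qualify,
--       For example in the list ["dog","bear","wolf","cat"] both dog and cat are shortest strings
--       In such cases, return the one with the lowest index (in this case, dog)
--
--     return False for empty list, not a list, or a list with at least one non-string item
--
--     >>> indexOfShortestString([])
--     False
--     >>> indexOfShortestString('foo')
--     False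
--     >>> indexOfShortestString(['foo'])
--     0
--     >>> indexOfShortestString(['bear','cat','dog','mouse'])
--     1
--     >>>
--     """
--     if type(listOfStrings)!=list or listOfStrings==[]:
--         return False
--
--     indexOfShortestSoFar = 0
--
--     for i in range(0,len(listOfStrings)):
--
--        if type(listOfStrings[i])!=str:
--           return False
--
--        if len(listOfStrings[i]) < len(listOfStrings[indexOfShortestSoFar]):
--           indexOfShortestSoFar = i
--
--     return indexOfShortestSoFar
-- ===== SOURCE B (Python) =====
-- def indexOfShortestString(listOfStrings):
--     if type(listOfStrings) != list or listOfStrings == []: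
--         return False
--     for s in listOfStrings:
--         if type(s) != str:
--             return False
--     shortest = min(len(s) for s in listOfStrings)
--     for i, s in enumerate(listOfStrings):
--         if len(s) == shortest:
--             return i
-- ===== Notes on version B (the rewrite author's own statement) =====
-- stated objective: alternative
-- what changed: A keeps a running argmin index in one interleaved validate-and-compare scan; B first validates, then computes the minimum LENGTH as a value, then searches for the first string of that length - it never maintains an argmin accumulator.
-- outside the precondition, e.g. on indexOfShortestString([]): A returns False, B returns False
import Mathlib
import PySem

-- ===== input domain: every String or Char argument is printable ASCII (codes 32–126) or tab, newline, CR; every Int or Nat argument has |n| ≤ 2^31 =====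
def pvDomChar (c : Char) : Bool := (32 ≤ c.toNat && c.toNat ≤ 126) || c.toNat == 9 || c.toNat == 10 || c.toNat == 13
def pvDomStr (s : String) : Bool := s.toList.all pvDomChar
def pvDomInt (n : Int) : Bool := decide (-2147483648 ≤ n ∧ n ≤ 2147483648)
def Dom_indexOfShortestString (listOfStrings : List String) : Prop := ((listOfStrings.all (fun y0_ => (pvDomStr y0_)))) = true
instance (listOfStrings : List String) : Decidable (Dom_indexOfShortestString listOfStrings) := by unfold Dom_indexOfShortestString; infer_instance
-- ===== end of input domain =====

-- B replaces A's interleaved running-argmin scan by: validate, compute the minimum length as a value, then find the first string of that length; equal on all non-empty inputs.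


-- ===== PORT A =====
-- A: guard, then one indexed loop keeping the index of the shortest string so far.
-- (On the empty list Python A returns the bool False, outside Int; excluded by Pre_.)
def indexOfShortestString (listOfStrings : List String) : Int :=
  if listOfStrings = [] then 0
  else
    (PySem.List.pyRange 0 (listOfStrings.length : Int) 1).foldl
      (fun indexOfShortestSoFar i =>
        if PySem.Str.len (PySem.List.pyGetD listOfStrings i "") <
           PySem.Str.len (PySem.List.pyGetD listOfStrings indexOfShortestSoFar "") then i
        else indexOfShortestSoFar)
      0

-- ===== PORT B =====
-- B's final loop: return the index of the first string whose length is m (unreachable [] case returns 0).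
def pvFindShort (m : Int) : List (Int × String) → Int
  | [] => 0
  | (i, s) :: t => if PySem.Str.len s = m then i else pvFindShort m t

-- B: guard, validation pass (vacuous over List String), min length as a value, then first index of that length.
def indexOfShortestString_alt (listOfStrings : List String) : Int :=
  if listOfStrings = [] then 0
  else
    let shortest := (PySem.List.min? (listOfStrings.map PySem.Str.len) (fun v => v)).getD 0
    pvFindShort shortest (PySem.List.enumerate listOfStrings 0)

-- ===== PRECONDITION & SPEC =====
-- Pre_ excludes only the empty list, on which Python A returns the bool False — not a value of the declared Int type.
def Pre_indexOfShortestString (listOfStrings : List String) : Prop := listOfStrings ≠ []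
instance (listOfStrings : List String) : Decidable (Pre_indexOfShortestString listOfStrings) := by unfold Pre_indexOfShortestString; infer_instance
def pvWitness_indexOfShortestString : List String := (["bear", "cat", "dog", "mouse"])

def Spec_indexOfShortestString (listOfStrings : List String) (out : Int) : Prop := out = indexOfShortestString_alt listOfStrings
instance (listOfStrings : List String) (out : Int) : Decidable (Spec_indexOfShortestString listOfStrings out) := by unfold Spec_indexOfShortestString; infer_instance

-- ===== CLAIM =====
def Claim_equal_indexOfShortestString : Prop := ∀ (listOfStrings : List String), Dom_indexOfShortestString listOfStrings → Pre_indexOfShortestString listOfStrings → Spec_indexOfShortestString listOfStrings (indexOfShortestString listOfStrings)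

-- ===== LEMMAS AND PROOFS =====

-- A's loop body, abstracted: first-wins argmin fold with key k.
def pvF (k : Int → Int) (m : Int) (l : List Int) : Int :=
  l.foldl (fun acc x => if k x < k acc then x else acc) m

-- find-first over bare indices keyed by k, mirroring pvFindShort.
def pvFindIdx (k : Int → Int) (v : Int) : List Int → Int
  | [] => 0
  | j :: t => if k j = v then j else pvFindIdx k v t

-- min? on a cons is the plain first-wins argmin foldl seeded with the head.
theorem min?_cons_eq {α : Type} (key : α → Int) :
    ∀ (l : List α) (m : α),
      PySem.List.min? (m :: l) key
        = some (l.foldl (fun acc x => if key x < key acc then x else acc) m) := by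
  intro l
  induction l with
  | nil => intro m; rfl
  | cons a t ih =>
      intro m
      by_cases h : key a < key m
      · have h1 : PySem.List.min? (m :: a :: t) key = PySem.List.min? (a :: t) key := by
          simp [PySem.List.min?, h]
        rw [h1, ih, List.foldl_cons]; simp [h]
      · have h1 : PySem.List.min? (m :: a :: t) key = PySem.List.min? (m :: t) key := by
          simp [PySem.List.min?, h]
        rw [h1, ih, List.foldl_cons]; simp [h]

-- min? commutes with map.
theorem min?_map {α β : Type} (g : α → β) (key : β → Int) :
    ∀ (l : List α), PySem.List.min? (l.map g) key = (PySem.List.min? l (fun x => key (g x))).map g := by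
  intro l
  cases l with
  | nil => rfl
  | cons a t =>
      rw [List.map_cons, min?_cons_eq, min?_cons_eq, Option.map_some]
      congr 1
      induction t generalizing a with
      | nil => rfl
      | cons b t ih =>
          simp only [List.map_cons, List.foldl_cons]
          by_cases h : key (g b) < key (g a) <;> simp [h, ih]

-- the argmin's key never exceeds the seed's key.
theorem pvF_key_le (k : Int → Int) : ∀ (l : List Int) (m : Int), k (pvF k m l) ≤ k m := by
  intro l
  induction l with
  | nil => intro m; simp [pvF]
  | cons a t ih =>
      intro m
      by_cases h : k a < k m
      · calc k (pvF k m (a :: t)) = k (pvF k a t) := by simp [pvF, h]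
          _ ≤ k a := ih a
          _ ≤ k m := le_of_lt h
      · calc k (pvF k m (a :: t)) = k (pvF k m t) := by simp [pvF, h]
          _ ≤ k m := ih m

-- finding the first element whose key equals the argmin's key returns the argmin.
theorem pvFindIdx_F (k : Int → Int) :
    ∀ (t : List Int) (m : Int), pvFindIdx k (k (pvF k m t)) (m :: t) = pvF k m t := by
  intro t
  induction t with
  | nil => intro m; simp [pvF, pvFindIdx]
  | cons a t ih =>
      intro m
      by_cases h : k a < k m
      · have hF : pvF k m (a :: t) = pvF k a t := by simp [pvF, h]
        have hne : k m ≠ k (pvF k a t) := by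
          have := pvF_key_le k t a; omega
        rw [hF, show pvFindIdx k (k (pvF k a t)) (m :: a :: t)
              = if k m = k (pvF k a t) then m else pvFindIdx k (k (pvF k a t)) (a :: t) from rfl,
           if_neg hne]
        exact ih a
      · have hF : pvF k m (a :: t) = pvF k m t := by simp [pvF, h]
        rw [hF]
        have ihm := ih m
        by_cases hm : k m = k (pvF k m t)
        · simp [pvFindIdx, hm] at ihm ⊢
          simpa [pvFindIdx, hm] using ihm
        · have hr : k (pvF k m t) ≤ k m := pvF_key_le k t m
          have ha : k a ≠ k (pvF k m t) := by omega
          simp only [pvFindIdx, if_neg hm, if_neg ha] at ihm ⊢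
          simpa [pvFindIdx, hm] using ihm

-- pvFindShort over enumerated pairs equals pvFindIdx over their indices when the key agrees.
theorem pvFindShort_eq (k : Int → Int) (v : Int) :
    ∀ (l : List (Int × String)), (∀ p ∈ l, k p.1 = PySem.Str.len p.2) →
      pvFindShort v l = pvFindIdx k v (l.map Prod.fst) := by
  intro l
  induction l with
  | nil => intro _; rfl
  | cons p t ih =>
      intro h
      obtain ⟨i, s⟩ := p
      have hk : k i = PySem.Str.len s := h (i, s) (by simp)
      rw [show pvFindShort v ((i, s) :: t) = if PySem.Str.len s = v then i else pvFindShort v t from rfl,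
         List.map_cons,
         show pvFindIdx k v (i :: t.map Prod.fst)
            = if k i = v then i else pvFindIdx k v (t.map Prod.fst) from rfl, hk]
      by_cases he : (s.length : Int) = v
      · simp [he]
      · simp [he, ih (fun q hq => h q (by simp [hq]))]

theorem indexOfShortestString_spec : Claim_equal_indexOfShortestString := by
  unfold Claim_equal_indexOfShortestString
  intro xs _ hpre
  unfold Spec_indexOfShortestString indexOfShortestString indexOfShortestString_alt
  have hne : xs ≠ [] := hpre
  simp only [if_neg hne]
  set k : Int → Int := fun i => PySem.Str.len (PySem.List.pyGetD xs i "") with hk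
  have hlen : (0 : Int) < (xs.length : Int) := by
    have : 0 < xs.length := List.length_pos_iff.mpr hne
    exact_mod_cast this
  -- the range 0..n-1 as 0 :: rest
  rw [PySem.List.pyRange_one_cons hlen, show ((0:Int)+1) = 1 from by norm_num]
  show List.foldl (fun acc i => if k i < k acc then i else acc) 0
        (0 :: PySem.List.pyRange 1 (xs.length : Int) 1)
      = pvFindShort ((PySem.List.min? (xs.map PySem.Str.len) (fun v => v)).getD 0)
          (PySem.List.enumerate xs 0)
  -- A's fold is pvF seeded with 0 over the tail of the range
  have hstep : List.foldl (fun acc i => if k i < k acc then i else acc) 0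
        (0 :: PySem.List.pyRange 1 (xs.length : Int) 1)
      = pvF k 0 (PySem.List.pyRange 1 (xs.length : Int) 1) := by
    simp [pvF]
  rw [hstep]
  -- B's min length equals the key of A's argmin
  have hmapk : xs.map PySem.Str.len
      = (PySem.List.pyRange 0 (xs.length : Int) 1).map k := by
    conv_lhs => rw [← PySem.List.map_pyGetD_pyRange_zero' xs ""]
    rw [List.map_map]; rfl
  have hmin : (PySem.List.min? (xs.map PySem.Str.len) (fun v => v)).getD 0
      = k (pvF k 0 (PySem.List.pyRange 1 (xs.length : Int) 1)) := by
    rw [hmapk, min?_map, PySem.List.pyRange_one_cons hlen,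
        show ((0:Int)+1) = 1 from by norm_num, min?_cons_eq]
    rfl
  rw [hmin]
  -- B's search over the enumeration is pvFindIdx over the range
  have hagree : ∀ p ∈ PySem.List.enumerate xs 0, k p.1 = PySem.Str.len p.2 := by
    intro p hp
    rw [PySem.List.mem_enumerate_iff] at hp
    obtain ⟨j, hj, rfl⟩ := hp
    simp [hk, PySem.List.pyGetD_natCast, List.getD_eq_getElem?_getD, hj]
  have henum : (PySem.List.enumerate xs 0).map Prod.fst
      = PySem.List.pyRange 0 (xs.length : Int) 1 := by
    simpa using PySem.List.map_fst_enumerate xs 0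
  rw [pvFindShort_eq k _ _ hagree, henum, PySem.List.pyRange_one_cons hlen,
      show ((0:Int)+1) = 1 from by norm_num]
  exact (pvFindIdx_F k (PySem.List.pyRange 1 (xs.length : Int) 1) 0).symm
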